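-- pv_equiv track=rewrite | github.com/ducphanduyagentp/CSCI-141 | Homework4/test_debug2.py | alphaSplit
-- ===== SOURCE A (Python) =====
-- def alphaSplit(inputString):
--     # go through the characters, one by one, and
--     # place the character at the end of a substring
--     # if possible.  If the character could extend
--     # both substrings, always prefer the substring
--     # whose current last character is closest alphabetically
--     # to the one being placed (i.e. prefer to 'use up'
--     # as little space as possible).
--
--     sub1 = ""
--     sub2 = ""
--
--     for idx in range(len(inputString)):  # Bug #1 fixed
--         currCh = inputString[idx]
--
--         if idx == 0:  # first character can always go in sub1
--             sub1 = currCh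
--
--         elif len(sub2) == 0:  # use sub1 if valid, uses up less space
--             if sub1[-1] <= currCh:
--                 sub1 = sub1 + currCh
--             else:
--                 sub2 = currCh
--
--         else:
--             # both substrings have characters.
--             # Return false if neither option is valid.
--             # Otherwise, choose the valid
--             # option that uses up less space.
--             if sub1[-1] > currCh and sub2[-1] > currCh:  # Bug #2 fixed
--                 # can't be placed, neither option valid; return false
--                 return False
--             elif sub1[-1] < sub2[-1]:
--                 # sub2[-1] is later in the alphabet, so use sub2 if possible
--                 # because it will use up less space
--                 if sub2[-1] <= currCh:
--                     sub2 = sub2 + currCh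
--                 else:
--                     sub1 = sub1 + currCh
--             else:
--                 # same idea with substring roles reversed
--                 if sub1[-1] <= currCh:
--                     sub1 = sub1 + currCh
--                 else:
--                     sub2 = sub2 + currCh
--
--     # made it to the end so must be True
--     return True
-- ===== SOURCE B (Python) =====
-- def alphaSplit(inputString):
--     # Different algorithm: by Dilworth's theorem the string splits into two
--     # non-descending subsequences iff it contains no strictly decreasing
--     # subsequence of length 3.  Detect such a triple by its middle element,
--     # using a precomputed suffix-minimum array and a prefix-maximum scan.
--     s = inputString
--     n = len(s)
--     suffmin = [None] * n          # suffmin[j] = min(s[j+1:]) or None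
--     m = None
--     for k in range(n - 1, -1, -1):
--         suffmin[k] = m
--         if m is None or s[k] < m:
--             m = s[k]
--     pmax = None                   # max(s[:j]) or None
--     for j in range(n):
--         c = s[j]
--         if pmax is not None and suffmin[j] is not None and suffmin[j] < c < pmax:
--             return False
--         if pmax is None or c > pmax:
--             pmax = c
--     return True
-- ===== Notes on version B (the rewrite author's own statement) =====
-- stated objective: alternative
-- what changed: B abandons the greedy two-subsequence simulation: by Dilworth's theorem the string splits into two non-descending subsequences iff it contains no strictly decreasing subsequence of length 3, so B detects such a triple by its middle element using a precomputed suffix-minimum array and a prefix-maximum scan.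
import Mathlib
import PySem

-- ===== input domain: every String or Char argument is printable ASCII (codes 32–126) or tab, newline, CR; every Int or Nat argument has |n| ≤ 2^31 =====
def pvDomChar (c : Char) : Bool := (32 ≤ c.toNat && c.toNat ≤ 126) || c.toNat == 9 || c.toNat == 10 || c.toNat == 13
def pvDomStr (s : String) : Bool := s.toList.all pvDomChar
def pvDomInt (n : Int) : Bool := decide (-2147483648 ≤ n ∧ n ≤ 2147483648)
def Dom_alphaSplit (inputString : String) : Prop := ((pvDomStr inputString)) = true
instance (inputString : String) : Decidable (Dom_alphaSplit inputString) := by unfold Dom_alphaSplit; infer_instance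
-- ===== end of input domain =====

-- B replaces A's greedy two-substring simulation by a Dilworth-style pattern check:
-- the string splits iff it has no strictly decreasing subsequence of length 3,
-- detected via a suffix-minimum array and a prefix-maximum scan (alternative algorithm).

-- ===== PORT A =====
-- A's loop with its early `return False`; sub1[-1]/sub2[-1] is List.getLast!
-- (exact: wherever A reads sub1[-1] or sub2[-1] that string is nonempty)
def alphaSplitGo (cs : List Char) (idx : Nat) (sub1 sub2 : List Char) : Bool :=
  match cs with
  | [] => true
  | currCh :: rest =>
    if idx = 0 then
      alphaSplitGo rest (idx + 1) [currCh] sub2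
    else if sub2.length = 0 then
      if sub1.getLast! ≤ currCh then
        alphaSplitGo rest (idx + 1) (sub1 ++ [currCh]) sub2
      else
        alphaSplitGo rest (idx + 1) sub1 [currCh]
    else
      if sub1.getLast! > currCh ∧ sub2.getLast! > currCh then
        false
      else if sub1.getLast! < sub2.getLast! then
        if sub2.getLast! ≤ currCh then
          alphaSplitGo rest (idx + 1) sub1 (sub2 ++ [currCh])
        else
          alphaSplitGo rest (idx + 1) (sub1 ++ [currCh]) sub2
      else
        if sub1.getLast! ≤ currCh then
          alphaSplitGo rest (idx + 1) (sub1 ++ [currCh]) sub2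
        else
          alphaSplitGo rest (idx + 1) sub1 (sub2 ++ [currCh])

def alphaSplit (inputString : String) : Bool :=
  alphaSplitGo inputString.toList 0 [] []

-- ===== PORT B =====
-- Source B's first loop (k from n-1 down to 0): returns (suffmin array, running min m);
-- structural recursion from the right is that loop step for step.
def suffminAux : List Char → List (Option Char) × Option Char
  | [] => ([], none)
  | c :: rest =>
    let p := suffminAux rest
    (p.2 :: p.1,
     match p.2 with
     | none => some c
     | some x => if c < x then some c else some x)

-- Source B's compound test `pmax is not None and suffmin[j] is not None and suffmin[j] < c < pmax`
def firedB (pmax sm : Option Char) (c : Char) : Bool :=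
  match pmax, sm with
  | some p, some q => decide (q < c ∧ c < p)
  | _, _ => false

-- Source B's `if pmax is None or c > pmax: pmax = c`
def pmaxUpd (pmax : Option Char) (c : Char) : Option Char :=
  match pmax with
  | none => some c
  | some p => if c > p then some c else some p

-- Source B's second loop over j, walking s and suffmin in step (same length in Source B,
-- so the mismatched-length branch is unreachable).
def scanB : List Char → List (Option Char) → Option Char → Bool
  | [], _, _ => true
  | _ :: _, [], _ => true
  | c :: rest, sm :: sms, pmax =>
    if firedB pmax sm c then false
    else scanB rest sms (pmaxUpd pmax c)

def alphaSplit_alt (inputString : String) : Bool :=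
  scanB inputString.toList (suffminAux inputString.toList).1 none

-- ===== PRECONDITION & SPEC =====
def Spec_alphaSplit (inputString : String) (out : Bool) : Prop := out = alphaSplit_alt inputString
instance (inputString : String) (out : Bool) : Decidable (Spec_alphaSplit inputString out) := by unfold Spec_alphaSplit; infer_instance

-- ===== CLAIM (what is proved, stated in full; the proofs are below) =====
def Claim_equal_alphaSplit : Prop := ∀ (inputString : String), Dom_alphaSplit inputString → Spec_alphaSplit inputString (alphaSplit inputString)

-- ===== LEMMAS AND PROOFS =====

-- Proof-side model of A: only the two tails matter (lo ≤ hi throughout a run).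
def goLH (cs : List Char) (lo hi : Char) : Bool :=
  match cs with
  | [] => true
  | ch :: rest =>
    if hi ≤ ch then goLH rest lo ch
    else if lo ≤ ch then goLH rest ch hi
    else false

lemma char_zero_le (c : Char) : Char.ofNat 0 ≤ c := by
  show (Char.ofNat 0).val ≤ c.val
  exact UInt32.zero_le

lemma char_not_lt_zero (c : Char) : ¬ c < Char.ofNat 0 :=
  not_lt.mpr (char_zero_le c)

lemma getLast!_concat (l : List Char) (c : Char) : (l ++ [c]).getLast! = c := by
  simp

-- once both substrings are nonempty, A's decisions depend only on the ordered pair of tails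
lemma go_eq_goLH_two : ∀ (cs : List Char) (idx : Nat) (sub1 sub2 : List Char),
    idx ≠ 0 → sub1 ≠ [] → sub2 ≠ [] →
    alphaSplitGo cs idx sub1 sub2 =
      goLH cs (min sub1.getLast! sub2.getLast!) (max sub1.getLast! sub2.getLast!) := by
  intro cs
  induction cs with
  | nil => intro idx sub1 sub2 _ _ _; rfl
  | cons c rest ih =>
    intro idx sub1 sub2 hidx h1 h2
    have h2len : sub2.length ≠ 0 := by simpa using h2
    simp only [alphaSplitGo, goLH]
    rw [if_neg hidx, if_neg h2len]
    by_cases hboth : sub1.getLast! > c ∧ sub2.getLast! > c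
    · have hmaxle : ¬ max sub1.getLast! sub2.getLast! ≤ c := by
        simp only [max_def]; split
        · exact not_le.mpr hboth.2
        · exact not_le.mpr hboth.1
      have hminle : ¬ min sub1.getLast! sub2.getLast! ≤ c := by
        simp only [min_def]; split
        · exact not_le.mpr hboth.1
        · exact not_le.mpr hboth.2
      rw [if_pos hboth, if_neg hmaxle, if_neg hminle]
    · rw [if_neg hboth]
      by_cases hab : sub1.getLast! < sub2.getLast!
      · have hminab : min sub1.getLast! sub2.getLast! = sub1.getLast! := min_eq_left (le_of_lt hab)
        have hmaxab : max sub1.getLast! sub2.getLast! = sub2.getLast! := max_eq_right (le_of_lt hab)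
        rw [if_pos hab, hminab, hmaxab]
        by_cases hbc : sub2.getLast! ≤ c
        · have hac : sub1.getLast! ≤ c := le_trans (le_of_lt hab) hbc
          have := ih (idx + 1) sub1 (sub2 ++ [c]) (by omega) h1 (by simp)
          rw [getLast!_concat, min_eq_left hac, max_eq_right hac] at this
          rw [if_pos hbc, if_pos hbc, this]
        · have hac : sub1.getLast! ≤ c := by
            by_contra hnac
            exact hboth ⟨lt_of_not_ge hnac, lt_of_not_ge hbc⟩
          have hcb : c < sub2.getLast! := lt_of_not_ge hbc
          have := ih (idx + 1) (sub1 ++ [c]) sub2 (by omega) (by simp) h2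
          rw [getLast!_concat, min_eq_left (le_of_lt hcb), max_eq_right (le_of_lt hcb)] at this
          rw [if_neg hbc, if_neg hbc, if_pos hac, this]
      · have hba : sub2.getLast! ≤ sub1.getLast! := le_of_not_gt hab
        have hminab : min sub1.getLast! sub2.getLast! = sub2.getLast! := min_eq_right hba
        have hmaxab : max sub1.getLast! sub2.getLast! = sub1.getLast! := max_eq_left hba
        rw [if_neg hab, hminab, hmaxab]
        by_cases hac : sub1.getLast! ≤ c
        · have hbc : sub2.getLast! ≤ c := le_trans hba hac
          have := ih (idx + 1) (sub1 ++ [c]) sub2 (by omega) (by simp) h2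
          rw [getLast!_concat, min_eq_right hbc, max_eq_left hbc] at this
          rw [if_pos hac, if_pos hac, this]
        · have hbc : sub2.getLast! ≤ c := by
            by_contra hnbc
            exact hboth ⟨lt_of_not_ge hac, lt_of_not_ge hnbc⟩
          have hca : c < sub1.getLast! := lt_of_not_ge hac
          have := ih (idx + 1) sub1 (sub2 ++ [c]) (by omega) h1 (by simp)
          rw [getLast!_concat, min_eq_right (le_of_lt hca), max_eq_left (le_of_lt hca)] at this
          rw [if_neg hac, if_neg hac, if_pos hbc, this]

-- while sub2 is still empty, the NUL sentinel lo plays sub2's role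
lemma go_eq_goLH_one : ∀ (cs : List Char) (idx : Nat) (sub1 : List Char),
    idx ≠ 0 → sub1 ≠ [] →
    alphaSplitGo cs idx sub1 [] =
      goLH cs (Char.ofNat 0) sub1.getLast! := by
  intro cs
  induction cs with
  | nil => intro idx sub1 _ _; rfl
  | cons c rest ih =>
    intro idx sub1 hidx h1
    simp only [alphaSplitGo, goLH]
    rw [if_neg hidx, if_pos (show ([] : List Char).length = 0 from rfl)]
    by_cases hle : sub1.getLast! ≤ c
    · have := ih (idx + 1) (sub1 ++ [c]) (by omega) (by simp)
      rw [getLast!_concat] at this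
      rw [if_pos hle, if_pos hle, this]
    · have hcl : c < sub1.getLast! := lt_of_not_ge hle
      have := go_eq_goLH_two rest (idx + 1) sub1 [c] (by omega) h1 (by simp)
      rw [show ([c] : List Char).getLast! = c from rfl,
        min_eq_right (le_of_lt hcl), max_eq_left (le_of_lt hcl)] at this
      rw [if_neg hle, if_neg hle, if_pos (char_zero_le c), this]

lemma alphaSplit_eq_goLH (s : String) :
    alphaSplit s = goLH s.toList (Char.ofNat 0) (Char.ofNat 0) := by
  unfold alphaSplit
  cases s.toList with
  | nil => rfl
  | cons c rest =>
    simp only [alphaSplitGo, goLH]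
    rw [if_pos trivial, if_pos (char_zero_le c)]
    have := go_eq_goLH_one rest 1 [c] (by omega) (by simp)
    rw [show ([c] : List Char).getLast! = c from rfl] at this
    exact this

-- characterisation targets
def ominGT : Option Char → Char → Prop
  | none, _ => False
  | some p, b => b < p

def ominLT : Option Char → Char → Prop
  | none, _ => False
  | some m, b => m < b

-- A (as goLH from state lo, hi) returns false iff some later element c is below lo,
-- or below some "middle" b before it (b smaller than hi or than some element before b)
def BadA (lo hi : Char) (cs : List Char) : Prop :=
  ∃ v c t, cs = v ++ c :: t ∧
    (c < lo ∨ ∃ v1 b v2, v = v1 ++ b :: v2 ∧ c < b ∧ (b < hi ∨ ∃ a ∈ v1, b < a))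

-- B (from prefix max pmax) returns false iff there is a middle b with something
-- bigger before it (or pmax) and something smaller after it
def BadB (pmax : Option Char) (cs : List Char) : Prop :=
  ∃ u b v c t, cs = u ++ b :: v ++ c :: t ∧ c < b ∧ (ominGT pmax b ∨ ∃ a ∈ u, b < a)

lemma suffmin_lt (cs : List Char) (b : Char) :
    ominLT (suffminAux cs).2 b ↔ ∃ y ∈ cs, y < b := by
  induction cs with
  | nil => simp [suffminAux, ominLT]
  | cons c rest ih =>
    simp only [suffminAux]
    cases hm : (suffminAux rest).2 with
    | none =>
      rw [hm] at ih
      simp only [ominLT]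
      simp only [ominLT] at ih
      simp [← ih]
    | some x =>
      rw [hm] at ih
      simp only [ominLT] at ih
      by_cases hcx : c < x
      · simp only [ominLT, if_pos hcx]
        constructor
        · intro h; exact ⟨c, by simp, h⟩
        · rintro ⟨y, hy, hyb⟩
          rcases List.mem_cons.mp hy with rfl | hy'
          · exact hyb
          · exact lt_trans hcx (ih.mpr ⟨y, hy', hyb⟩)
      · simp only [ominLT, if_neg hcx]
        constructor
        · intro h
          obtain ⟨y, hy, hyb⟩ := ih.mp h
          exact ⟨y, List.mem_cons_of_mem _ hy, hyb⟩
        · rintro ⟨y, hy, hyb⟩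
          rcases List.mem_cons.mp hy with rfl | hy'
          · exact lt_of_le_of_lt (le_of_not_gt hcx) hyb
          · exact ih.mpr ⟨y, hy', hyb⟩

lemma goLH_char : ∀ (cs : List Char) (lo hi : Char), lo ≤ hi →
    (goLH cs lo hi = false ↔ BadA lo hi cs) := by
  intro cs
  induction cs with
  | nil =>
    intro lo hi _
    constructor
    · intro h; simp [goLH] at h
    · rintro ⟨v, c, t, h, -⟩
      exact absurd h (by simp)
  | cons c rest ih =>
    intro lo hi hlohi
    simp only [goLH]
    by_cases hhic : hi ≤ c
    · rw [if_pos hhic, ih lo c (le_trans hlohi hhic)]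
      constructor
      · rintro ⟨v, c', t, hv, hcond⟩
        refine ⟨c :: v, c', t, by rw [hv]; rfl, ?_⟩
        rcases hcond with hlt | ⟨v1, b, v2, hv1, hcb, hside⟩
        · exact Or.inl hlt
        · refine Or.inr ⟨c :: v1, b, v2, by rw [hv1]; rfl, hcb, ?_⟩
          rcases hside with hbc | ⟨a, ha, hba⟩
          · exact Or.inr ⟨c, by simp, hbc⟩
          · exact Or.inr ⟨a, by simp [ha], hba⟩
      · rintro ⟨v, c', t, hv, hcond⟩
        cases v with
        | nil =>
          simp only [List.nil_append, List.cons.injEq] at hv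
          obtain ⟨rfl, rfl⟩ := hv
          rcases hcond with hlt | ⟨v1, b, v2, hv1, _, _⟩
          · exact absurd hlt (not_lt.mpr (le_trans hlohi hhic))
          · exact absurd hv1 (by simp)
        | cons x v' =>
          simp only [List.cons_append, List.cons.injEq] at hv
          obtain ⟨rfl, hv⟩ := hv
          refine ⟨v', c', t, hv, ?_⟩
          rcases hcond with hlt | ⟨v1, b, v2, hv1, hcb, hside⟩
          · exact Or.inl hlt
          · cases v1 with
            | nil =>
              simp only [List.nil_append, List.cons.injEq] at hv1
              obtain ⟨rfl, rfl⟩ := hv1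
              rcases hside with hbhi | ⟨a, ha, _⟩
              · exact absurd hbhi (not_lt.mpr hhic)
              · exact absurd ha (by simp)
            | cons y v1' =>
              simp only [List.cons_append, List.cons.injEq] at hv1
              obtain ⟨rfl, hv1⟩ := hv1
              refine Or.inr ⟨v1', b, v2, hv1, hcb, ?_⟩
              rcases hside with hbhi | ⟨a, ha, hba⟩
              · exact Or.inl (lt_of_lt_of_le hbhi hhic)
              · rcases List.mem_cons.mp ha with rfl | ha'
                · exact Or.inl hba
                · exact Or.inr ⟨a, ha', hba⟩
    · rw [if_neg hhic]
      have hchi : c < hi := lt_of_not_ge hhic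
      by_cases hloc : lo ≤ c
      · rw [if_pos hloc, ih c hi (le_of_lt hchi)]
        constructor
        · rintro ⟨v, c', t, hv, hcond⟩
          refine ⟨c :: v, c', t, by rw [hv]; rfl, ?_⟩
          rcases hcond with hlt | ⟨v1, b, v2, hv1, hcb, hside⟩
          · exact Or.inr ⟨[], c, v, rfl, hlt, Or.inl hchi⟩
          · refine Or.inr ⟨c :: v1, b, v2, by rw [hv1]; rfl, hcb, ?_⟩
            rcases hside with hbhi | ⟨a, ha, hba⟩
            · exact Or.inl hbhi
            · exact Or.inr ⟨a, by simp [ha], hba⟩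
        · rintro ⟨v, c', t, hv, hcond⟩
          cases v with
          | nil =>
            simp only [List.nil_append, List.cons.injEq] at hv
            obtain ⟨rfl, rfl⟩ := hv
            rcases hcond with hlt | ⟨v1, b, v2, hv1, _, _⟩
            · exact absurd hlt (not_lt.mpr hloc)
            · exact absurd hv1 (by simp)
          | cons x v' =>
            simp only [List.cons_append, List.cons.injEq] at hv
            obtain ⟨rfl, hv⟩ := hv
            refine ⟨v', c', t, hv, ?_⟩
            rcases hcond with hlt | ⟨v1, b, v2, hv1, hcb, hside⟩
            · exact Or.inl (lt_of_lt_of_le hlt hloc)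
            · cases v1 with
              | nil =>
                simp only [List.nil_append, List.cons.injEq] at hv1
                obtain ⟨rfl, rfl⟩ := hv1
                exact Or.inl hcb
              | cons y v1' =>
                simp only [List.cons_append, List.cons.injEq] at hv1
                obtain ⟨rfl, hv1⟩ := hv1
                refine Or.inr ⟨v1', b, v2, hv1, hcb, ?_⟩
                rcases hside with hbhi | ⟨a, ha, hba⟩
                · exact Or.inl hbhi
                · rcases List.mem_cons.mp ha with rfl | ha'
                  · exact Or.inl (lt_trans hba hchi)
                  · exact Or.inr ⟨a, ha', hba⟩
      · rw [if_neg hloc]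
        constructor
        · intro _
          exact ⟨[], c, rest, rfl, Or.inl (lt_of_not_ge hloc)⟩
        · intro _; rfl

lemma scanB_char : ∀ (cs : List Char) (pmax : Option Char),
    (scanB cs (suffminAux cs).1 pmax = false) ↔ BadB pmax cs := by
  intro cs
  induction cs with
  | nil =>
    intro pmax
    constructor
    · intro h; simp [scanB] at h
    · rintro ⟨u, b, v, c, t, h, -, -⟩
      exact absurd h (by simp)
  | cons c rest ih =>
    intro pmax
    have hfst : (suffminAux (c :: rest)).1 = (suffminAux rest).2 :: (suffminAux rest).1 := rfl
    rw [hfst]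
    simp only [scanB]
    by_cases hf : firedB pmax (suffminAux rest).2 c = true
    · rw [if_pos hf]
      constructor
      · intro _
        -- extract the witnesses from the fired condition
        rcases pmax with _ | p <;> rcases hq : (suffminAux rest).2 with _ | q <;>
          rw [hq] at hf <;> simp only [firedB, decide_eq_true_eq] at hf
        · exact absurd hf (by simp)
        · exact absurd hf (by simp)
        · exact absurd hf (by simp)
        obtain ⟨hqc, hcp⟩ := hf
        have hy' : ∃ y ∈ rest, y < c := by
          have h := suffmin_lt rest c
          rw [hq] at h
          exact h.mp hqc
        obtain ⟨y, hy, hyc⟩ := hy'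
        obtain ⟨v, t, rfl⟩ := List.append_of_mem hy
        exact ⟨[], c, v, y, t, rfl, hyc, Or.inl hcp⟩
      · intro _; rfl
    · rw [if_neg hf, ih (pmaxUpd pmax c)]
      constructor
      · rintro ⟨u, b, v, c', t, hv, hcb, hside⟩
        refine ⟨c :: u, b, v, c', t, by rw [hv]; rfl, hcb, ?_⟩
        rcases hside with hgt | ⟨a, ha, hba⟩
        · -- pmaxUpd pmax c > b  ⇒  pmax > b or c > b
          rcases pmax with _ | p <;> simp only [pmaxUpd, ominGT] at hgt
          · exact Or.inr ⟨c, by simp, hgt⟩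
          · by_cases hcp : c > p
            · rw [if_pos hcp] at hgt
              exact Or.inr ⟨c, by simp, hgt⟩
            · rw [if_neg hcp] at hgt
              exact Or.inl hgt
        · exact Or.inr ⟨a, by simp [ha], hba⟩
      · rintro ⟨u, b, v, c', t, hv, hcb, hside⟩
        cases u with
        | nil =>
          rw [List.nil_append] at hv
          injection hv with hcb2 hv
          subst hcb2
          -- the head itself is the middle: the test would have fired
          exfalso
          rcases hside with hgt | ⟨a, ha, _⟩
          · rcases pmax with _ | p
            · exact hgt.elim
            · simp only [ominGT] at hgt
              have hmem : c' ∈ rest := by rw [hv]; simp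
              have hlt : ominLT (suffminAux rest).2 c :=
                (suffmin_lt rest c).mpr ⟨c', hmem, hcb⟩
              rcases hq : (suffminAux rest).2 with _ | q <;> rw [hq] at hlt <;>
                simp only [ominLT] at hlt
              apply hf
              rw [hq]
              simp [firedB, hlt, hgt]
          · exact absurd ha (by simp)
        | cons x u' =>
          simp only [List.cons_append, List.cons.injEq] at hv
          obtain ⟨rfl, hv⟩ := hv
          refine ⟨u', b, v, c', t, hv, hcb, ?_⟩
          rcases hside with hgt | ⟨a, ha, hba⟩
          · -- pmax > b  ⇒  pmaxUpd pmax c > b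
            rcases pmax with _ | p
            · exact hgt.elim
            · left
              simp only [pmaxUpd]
              by_cases hcp : c > p
              · rw [if_pos hcp]
                exact lt_trans hgt hcp
              · rw [if_neg hcp]
                exact hgt
          · rcases List.mem_cons.mp ha with rfl | ha'
            · left
              rcases pmax with _ | p
              · exact hba
              · simp only [pmaxUpd]
                by_cases hcp : a > p
                · rw [if_pos hcp]
                  exact hba
                · rw [if_neg hcp]
                  exact lt_of_lt_of_le hba (le_of_not_gt hcp)
            · exact Or.inr ⟨a, ha', hba⟩

lemma badA_iff_badB (cs : List Char) :
    BadA (Char.ofNat 0) (Char.ofNat 0) cs ↔ BadB none cs := by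
  constructor
  · rintro ⟨v, c, t, hv, hcond⟩
    rcases hcond with hlt | ⟨v1, b, v2, hv1, hcb, hside⟩
    · exact absurd hlt (char_not_lt_zero c)
    · rcases hside with hbz | ⟨a, ha, hba⟩
      · exact absurd hbz (char_not_lt_zero b)
      · exact ⟨v1, b, v2, c, t, by simp [hv, hv1], hcb, Or.inr ⟨a, ha, hba⟩⟩
  · rintro ⟨u, b, v, c, t, hv, hcb, hside⟩
    rcases hside with hgt | ⟨a, ha, hba⟩
    · exact hgt.elim
    · exact ⟨u ++ b :: v, c, t, by simp [hv],
        Or.inr ⟨u, b, v, rfl, hcb, Or.inr ⟨a, ha, hba⟩⟩⟩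

-- ===== VERDICT (by name: the statement is the Claim_ definition above) =====
theorem alphaSplit_spec : Claim_equal_alphaSplit := by
  intro s _
  show alphaSplit s = alphaSplit_alt s
  have hA : alphaSplit s = false ↔ BadB none s.toList := by
    rw [alphaSplit_eq_goLH,
      goLH_char s.toList (Char.ofNat 0) (Char.ofNat 0) (le_refl _), badA_iff_badB]
  have hB : alphaSplit_alt s = false ↔ BadB none s.toList := scanB_char s.toList none
  cases ha : alphaSplit s <;> cases hb : alphaSplit_alt s
  · rfl
  · exact absurd (hB.mpr (hA.mp ha)) (by simp [hb])
  · exact absurd (hA.mpr (hB.mp hb)) (by simp [ha])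
  · rfl
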